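-- pv_equiv track=rewrite | github.com/Steven-ZhangJM/CS263_Final_Project | solution/p249_4.py | get_prime_subsets
-- ===== SOURCE A (Python) =====
-- import math
--
-- def is_prime(n):
--     if n <= 1:
--         return False
--     for i in range(2, int(math.sqrt(n)) + 1):
--         if n % i == 0:
--             return False
--     return True
--
-- def get_prime_subsets(primes):
--     prime_subsets = set()
--     for i in range(len(primes)):
--         for j in range(i + 1, len(primes)):
--             subset_sum = sum(set([primes[i], primes[j]]))
--             if is_prime(subset_sum):
--                 prime_subsets.add(tuple(sorted([primes[i], primes[j]])))
--     for k in range(3, len(primes)):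
--         for l in range(k + 1, len(primes)):
--             subset_sum = sum(set([primes[k], primes[l]]))
--             if is_prime(subset_sum):
--                 prime_subsets.add(tuple(sorted([primes[k], primes[l]])))
--     return prime_subsets
-- ===== SOURCE B (Python) =====
-- import math
--
-- def is_prime(n):
--     if n <= 1:
--         return False
--     for i in range(2, int(math.sqrt(n)) + 1):
--         if n % i == 0:
--             return False
--     return True
--
-- def get_prime_subsets(primes):
--     # One pass over the suffixes of the list: pair the current head with every
--     # later element; equal values collapse (Python set-sum quirk) to the value itself.
--     result = set()
--     rest = list(primes)
--     while rest:
--         p = rest.pop(0)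
--         for q in rest:
--             s = p if p == q else p + q
--             if is_prime(s):
--                 result.add((p, q) if p < q else (q, p))
--     return result
-- ===== Notes on version B (the rewrite author's own statement) =====
-- stated objective: alternative
-- what changed: B replaces A's two index-based double loops by a single pass over the list's suffixes (pair each head with every later element, no index arithmetic), computes the pair sum and the ordered pair arithmetically instead of building a set and a sorted list per pair, and drops A's second double loop entirely, which is provably redundant.
import Mathlib
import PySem

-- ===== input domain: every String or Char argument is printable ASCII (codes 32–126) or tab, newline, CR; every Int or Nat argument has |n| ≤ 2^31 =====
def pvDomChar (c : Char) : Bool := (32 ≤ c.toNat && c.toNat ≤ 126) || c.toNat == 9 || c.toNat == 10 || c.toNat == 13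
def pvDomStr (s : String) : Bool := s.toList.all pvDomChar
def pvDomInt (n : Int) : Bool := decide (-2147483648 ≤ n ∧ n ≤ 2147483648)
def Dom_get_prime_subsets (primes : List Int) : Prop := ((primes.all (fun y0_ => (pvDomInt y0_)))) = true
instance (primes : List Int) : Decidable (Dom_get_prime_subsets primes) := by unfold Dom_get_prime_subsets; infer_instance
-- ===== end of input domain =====

-- B makes a single pass over the list's suffixes (no index loops, no per-pair set/sorted
-- allocations) and drops A's second double loop, which is provably redundant.

-- ===== PORT A =====
-- int(math.sqrt(n)) is ported as Nat.sqrt n.toNat: exact on this file's domain, where sqrt is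
-- only evaluated for 2 ≤ n ≤ 2^32 and math.sqrt is a correctly rounded double there.
def is_prime (n : Int) : Bool :=
  if n ≤ 1 then false
  else (PySem.List.pyRange 2 ((Nat.sqrt n.toNat : Int) + 1) 1).all
        (fun i => !(PySem.Int.mod n i == 0))

-- tuple(sorted([a, b])) — sorted of a two-element list, read back as a pair
def pairOf (a b : Int) : Int × Int :=
  match PySem.List.sorted [a, b] (fun x => x) false with
  | [x, y] => (x, y)
  | _ => (0, 0)

def get_prime_subsets (primes : List Int) : List (Int × Int) :=
  let n : Int := primes.length
  -- indices produced by range(...) are always in range, so the pyGetD default 0 is never used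
  let s1 : PySem.Set (Int × Int) :=
    (PySem.List.pyRange 0 n 1).foldl (fun ps i =>
      (PySem.List.pyRange (i + 1) n 1).foldl (fun ps j =>
        let subset_sum :=
          (PySem.Set.ofList [PySem.List.pyGetD primes i 0, PySem.List.pyGetD primes j 0]).sum
        if is_prime subset_sum then
          PySem.Set.add ps (pairOf (PySem.List.pyGetD primes i 0) (PySem.List.pyGetD primes j 0))
        else ps) ps) PySem.Set.empty
  (PySem.List.pyRange 3 n 1).foldl (fun ps k =>
    (PySem.List.pyRange (k + 1) n 1).foldl (fun ps l =>
      let subset_sum :=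
        (PySem.Set.ofList [PySem.List.pyGetD primes k 0, PySem.List.pyGetD primes l 0]).sum
      if is_prime subset_sum then
        PySem.Set.add ps (pairOf (PySem.List.pyGetD primes k 0) (PySem.List.pyGetD primes l 0))
      else ps) ps) s1

-- ===== PORT B =====
-- the while/pop(0) loop of Source B: process the head against the rest, recurse on the rest
def altGo (rest : List Int) (result : PySem.Set (Int × Int)) : PySem.Set (Int × Int) :=
  match rest with
  | [] => result
  | p :: rest' =>
      altGo rest' (rest'.foldl (fun r q =>
        if is_prime (if p == q then p else p + q) then
          PySem.Set.add r (if p < q then (p, q) else (q, p))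
        else r) result)

def get_prime_subsets_alt (primes : List Int) : List (Int × Int) :=
  altGo primes PySem.Set.empty

-- ===== PRECONDITION & SPEC =====
def Spec_get_prime_subsets (primes : List Int) (out : List (Int × Int)) : Prop := out = get_prime_subsets_alt primes
instance (primes : List Int) (out : List (Int × Int)) : Decidable (Spec_get_prime_subsets primes out) := by unfold Spec_get_prime_subsets; infer_instance

-- ===== CLAIM (what is proved, stated in full; the proofs are below) =====
def Claim_equal_get_prime_subsets : Prop := ∀ (primes : List Int), Dom_get_prime_subsets primes → Spec_get_prime_subsets primes (get_prime_subsets primes)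

-- ===== LEMMAS AND PROOFS =====

-- A's inner-loop body, on values
def stepA (p : Int) (r : PySem.Set (Int × Int)) (q : Int) : PySem.Set (Int × Int) :=
  if is_prime ((PySem.Set.ofList [p, q]).sum) then PySem.Set.add r (pairOf p q) else r

-- B's inner-loop body, on values
def stepB (p : Int) (r : PySem.Set (Int × Int)) (q : Int) : PySem.Set (Int × Int) :=
  if is_prime (if p == q then p else p + q) then
    PySem.Set.add r (if p < q then (p, q) else (q, p))
  else r

lemma sum_ofList_pair (p q : Int) :
    (PySem.Set.ofList [p, q]).sum = if p == q then p else p + q := by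
  by_cases h : p = q
  · subst h; simp [PySem.Set.ofList_eq_foldl]
  · have h' : ¬ (q = p) := fun hh => h hh.symm
    simp [PySem.Set.ofList_eq_foldl, h, h']

lemma pairOf_eq (p q : Int) :
    pairOf p q = if q < p then (q, p) else (p, q) := by
  by_cases h : q < p <;>
    simp [pairOf, PySem.List.sorted_eq_foldl_insertBy, PySem.List.insertBy, h]

lemma stepA_eq_stepB (p : Int) (r : PySem.Set (Int × Int)) (q : Int) :
    stepA p r q = stepB p r q := by
  have hpair : (if q < p then (q, p) else (p, q)) = (if p < q then (p, q) else (q, p)) := by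
    rcases lt_trichotomy p q with h | h | h
    · rw [if_neg (by omega), if_pos h]
    · subst h; simp
    · rw [if_pos h, if_neg (by omega)]
  simp only [stepA, stepB, sum_ofList_pair, pairOf_eq, hpair]

-- A's first double loop, started on the suffix of the list that begins at index a, is B's pass
lemma loopA_suffix (full : List Int) :
    ∀ (l : List Int) (a : Int), 0 ≤ a → full.drop a.toNat = l →
    ∀ (s : PySem.Set (Int × Int)),
    (PySem.List.pyRange a (full.length : Int) 1).foldl
      (fun ps i => (PySem.List.pyRange (i + 1) (full.length : Int) 1).foldl
        (fun ps j => stepA (PySem.List.pyGetD full i 0) ps (PySem.List.pyGetD full j 0)) ps) s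
    = altGo l s := by
  intro l
  induction l with
  | nil =>
      intro a ha hd s
      have hlen : full.length ≤ a.toNat := List.drop_eq_nil_iff.mp hd
      have : (full.length : Int) ≤ a := by omega
      rw [PySem.List.pyRange_one_eq_nil this]
      rfl
  | cons p t ih =>
      intro a ha hd s
      have halt : a.toNat < full.length := by
        by_contra h
        rw [List.drop_eq_nil_of_le (by omega)] at hd
        exact List.cons_ne_nil _ _ hd.symm
      have ha' : a < (full.length : Int) := by omega
      have hsplit : full[a.toNat] :: full.drop (a.toNat + 1) = p :: t := by
        rw [← List.drop_eq_getElem_cons halt, hd]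
      have hget : PySem.List.pyGetD full a 0 = p := by
        rw [PySem.List.pyGetD_eq_getElem full 0 ha (by omega)]
        exact List.head_eq_of_cons_eq hsplit
      have hdrop : full.drop (a + 1).toNat = t := by
        have h1 : (a + 1).toNat = a.toNat + 1 := by omega
        rw [h1]
        exact List.tail_eq_of_cons_eq hsplit
      rw [PySem.List.pyRange_one_cons ha']
      simp only [List.foldl_cons]
      have hinner : ∀ (s' : PySem.Set (Int × Int)),
          (PySem.List.pyRange (a + 1) (full.length : Int) 1).foldl
            (fun ps j => stepA (PySem.List.pyGetD full a 0) ps (PySem.List.pyGetD full j 0)) s'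
          = t.foldl (stepA p) s' := by
        intro s'
        rw [PySem.List.foldl_pyRange_pyGetD' full 0 _ s' (by omega), hdrop, hget]
      rw [hinner]
      rw [ih (a + 1) (by omega) hdrop]
      have hcongr : t.foldl (stepA p) s = t.foldl (stepB p) s :=
        PySem.List.foldl_congr_mem (l := t) (f := stepA p) (g := stepB p) (init := s)
          (fun acc x _ => stepA_eq_stepB p acc x)
      rw [hcongr]
      rfl

lemma foldl_fixed {α β : Type} (f : β → α → β) (S : β) :
    ∀ (l : List α), (∀ x ∈ l, f S x = S) → l.foldl f S = S := by
  intro l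
  induction l with
  | nil => intro _; rfl
  | cons x t ih =>
      intro h
      simp only [List.foldl_cons, h x (List.mem_cons_self)]
      exact ih (fun y hy => h y (List.mem_cons_of_mem _ hy))

lemma mem_foldl_stepB (p : Int) (x : Int × Int) :
    ∀ (t : List Int) (s : PySem.Set (Int × Int)), x ∈ s → x ∈ t.foldl (stepB p) s := by
  intro t
  induction t with
  | nil => intro s hs; exact hs
  | cons q t ih =>
      intro s hs
      apply ih
      by_cases hc : is_prime (if p == q then p else p + q) = true
      · simp only [stepB, if_pos hc]
        exact (PySem.Set.mem_add _ _ _).mpr (Or.inl hs)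
      · simp only [stepB, if_neg hc]
        exact hs

lemma mem_altGo (x : Int × Int) :
    ∀ (l : List Int) (s : PySem.Set (Int × Int)), x ∈ s → x ∈ altGo l s := by
  intro l
  induction l with
  | nil => intro s hs; exact hs
  | cons p t ih =>
      intro s hs
      exact ih _ (mem_foldl_stepB p x t s hs)

lemma mem_inner_stepB (p q : Int)
    (hc : is_prime (if p == q then p else p + q) = true) :
    ∀ (t : List Int) (s : PySem.Set (Int × Int)), q ∈ t →
      (if p < q then (p, q) else (q, p)) ∈ t.foldl (stepB p) s := by
  intro t
  induction t with
  | nil => intro s h; cases h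
  | cons r t ih =>
      intro s h
      rcases List.mem_cons.mp h with h | h
      · subst h
        rw [List.foldl_cons]
        apply mem_foldl_stepB
        simp only [stepB, if_pos hc]
        exact (PySem.Set.mem_add _ _ _).mpr (Or.inr rfl)
      · exact ih _ h

lemma mem_altGo_idx :
    ∀ (l : List Int) (s : PySem.Set (Int × Int)) (i j : Nat) (hij : i < j) (hj : j < l.length),
      is_prime (if l[i]'(by omega) == l[j] then l[i]'(by omega) else l[i]'(by omega) + l[j]) = true →
      (if l[i]'(by omega) < l[j] then (l[i]'(by omega), l[j]) else (l[j], l[i]'(by omega))) ∈ altGo l s := by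
  intro l
  induction l with
  | nil => intro s i j hij hj; exact absurd hj (Nat.not_lt_zero j)
  | cons p t ih =>
      intro s i j hij hj hc
      match i, j with
      | 0, j + 1 =>
          have hj' : j < t.length := by simpa using hj
          simp only [List.getElem_cons_zero, List.getElem_cons_succ] at hc ⊢
          have hjt : t[j] ∈ t := List.getElem_mem _
          exact mem_altGo _ t _ (mem_inner_stepB p t[j] hc t s hjt)
      | i + 1, j + 1 =>
          have hj' : j < t.length := by simpa using hj
          simp only [List.getElem_cons_succ] at hc ⊢
          exact ih _ i j (by omega) hj' hc

-- second double loop of A: every pair it would add is already in the set, so it is the identity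
lemma loop2_eq (primes : List Int) :
    (PySem.List.pyRange 3 (primes.length : Int) 1).foldl (fun ps k =>
      (PySem.List.pyRange (k + 1) (primes.length : Int) 1).foldl
        (fun ps l => stepA (PySem.List.pyGetD primes k 0) ps (PySem.List.pyGetD primes l 0)) ps)
      (altGo primes PySem.Set.empty)
    = altGo primes PySem.Set.empty := by
  apply foldl_fixed
  intro k hk
  rw [PySem.List.mem_pyRange_one] at hk
  apply foldl_fixed
  intro l hl
  rw [PySem.List.mem_pyRange_one] at hl
  have hkn : k.toNat < primes.length := by omega
  have hln : l.toNat < primes.length := by omega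
  have hkl : k.toNat < l.toNat := by omega
  have hgk : PySem.List.pyGetD primes k 0 = primes[k.toNat] :=
    PySem.List.pyGetD_eq_getElem primes 0 (by omega) (by omega)
  have hgl : PySem.List.pyGetD primes l 0 = primes[l.toNat] :=
    PySem.List.pyGetD_eq_getElem primes 0 (by omega) (by omega)
  rw [stepA_eq_stepB, hgk, hgl]
  unfold stepB
  by_cases hc : is_prime (if primes[k.toNat] == primes[l.toNat] then primes[k.toNat]
      else primes[k.toNat] + primes[l.toNat]) = true
  · rw [if_pos hc]
    exact PySem.Set.add_of_mem
      (mem_altGo_idx primes PySem.Set.empty k.toNat l.toNat hkl hln hc)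
  · rw [if_neg hc]

-- ===== VERDICT (by name: the statement is the Claim_ definition above) =====
theorem get_prime_subsets_spec : Claim_equal_get_prime_subsets := by
  intro primes _
  show get_prime_subsets primes = get_prime_subsets_alt primes
  have h1 : get_prime_subsets primes
      = (PySem.List.pyRange 3 (primes.length : Int) 1).foldl (fun ps k =>
          (PySem.List.pyRange (k + 1) (primes.length : Int) 1).foldl
            (fun ps l => stepA (PySem.List.pyGetD primes k 0) ps (PySem.List.pyGetD primes l 0)) ps)
          ((PySem.List.pyRange 0 (primes.length : Int) 1).foldl (fun ps i =>
            (PySem.List.pyRange (i + 1) (primes.length : Int) 1).foldl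
              (fun ps j => stepA (PySem.List.pyGetD primes i 0) ps (PySem.List.pyGetD primes j 0)) ps)
            PySem.Set.empty) := rfl
  rw [h1, loopA_suffix primes primes 0 le_rfl (by simp) PySem.Set.empty, loop2_eq]
  rfl
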